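-- pv_equiv track=rewrite | github.com/Tharindu-P/BDD | jointures.py | sort_and_merge
-- ===== SOURCE A (Python) =====
-- def sort_and_merge(reservations, vols, join_key):
--     """Trie et fusionne les réservations et les vols en fonction d'un attribut commun."""
--     # Tri des réservations et des vols
--     reservations.sort(key=lambda x: x['vol']['id'])  # Sort by vol id
--     vols.sort(key=lambda x: x['id'])  # Sort by vol id
--
--     merged_result = []
--     i, j = 0, 0
--
--     # Fusionner les deux listes triées
--     while i < len(reservations) and j < len(vols):
--         if reservations[i]['vol']['id'] == vols[j]['id']:
--             merged_result.append(reservations[i])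
--             merged_result[-1]['vol'].update(vols[j])  # Ajouter les informations du vol
--             i += 1
--             j += 1
--         elif reservations[i]['vol']['id'] < vols[j]['id']:
--             i += 1
--         else:
--             j += 1
--
--     return merged_result
-- ===== SOURCE B (Python) =====
-- def sort_and_merge(reservations, vols, join_key):
--     """Trie et fusionne les reservations et les vols via un index par id (piles LIFO par vol id)."""
--     reservations.sort(key=lambda x: x['vol']['id'])
--     vols.sort(key=lambda x: x['id'])
--
--     # index: vol id -> stack of its vols, pushed in reverse sorted order,
--     # so pop() yields the vols of that id in sorted (stable) order
--     queues = {}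
--     for v in reversed(vols):
--         queues.setdefault(v['id'], []).append(v)
--
--     merged_result = []
--     for r in reservations:
--         q = queues.get(r['vol']['id'])
--         if q:
--             v = q.pop()
--             merged_result.append(r)
--             r['vol'].update(v)
--     return merged_result
-- ===== Notes on version B (the rewrite author's own statement) =====
-- stated objective: alternative
-- what changed: Replaced the two-pointer merge over the two sorted lists by a hash index: vols are grouped into per-id FIFO queues, then one pass over the sorted reservations pops the next matching vol for each reservation.
import Mathlib
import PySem

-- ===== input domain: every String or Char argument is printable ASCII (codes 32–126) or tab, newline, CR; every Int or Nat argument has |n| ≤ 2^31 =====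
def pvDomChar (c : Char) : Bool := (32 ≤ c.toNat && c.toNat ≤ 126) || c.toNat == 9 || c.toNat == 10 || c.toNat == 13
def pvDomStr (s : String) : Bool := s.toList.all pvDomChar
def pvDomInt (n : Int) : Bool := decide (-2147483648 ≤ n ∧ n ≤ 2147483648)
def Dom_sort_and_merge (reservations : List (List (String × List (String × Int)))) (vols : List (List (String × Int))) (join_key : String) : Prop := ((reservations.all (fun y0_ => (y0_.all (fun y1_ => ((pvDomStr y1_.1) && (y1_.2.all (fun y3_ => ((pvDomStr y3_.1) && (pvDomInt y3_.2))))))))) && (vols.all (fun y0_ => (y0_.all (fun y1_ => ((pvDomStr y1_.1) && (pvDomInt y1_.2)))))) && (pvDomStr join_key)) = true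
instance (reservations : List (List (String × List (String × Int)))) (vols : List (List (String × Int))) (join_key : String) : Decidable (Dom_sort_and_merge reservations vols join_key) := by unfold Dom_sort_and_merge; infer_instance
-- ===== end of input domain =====

-- B replaces A's two-pointer merge of the two sorted lists by a per-id index of vol stacks (same
-- cost class; 'alternative'). Both A and B sort `reservations` and `vols` IN PLACE and update the
-- matched reservations' 'vol' dicts in place; the equivalence proved here is about the RETURN value.

-- ===== PORT A =====
-- shared helpers: the subexpressions r['vol'], v['id'], r['vol']['id'] and
-- "merged_result.append(r); r['vol'].update(v)" occur verbatim in BOTH Pythons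
def pvVolOf (r : List (String × List (String × Int))) : List (String × Int) :=
  ((PySem.Dict.mk r).get? "vol").getD []          -- r['vol']  (Pre_ guarantees the key is present)

def pvVid (v : List (String × Int)) : Int :=
  (PySem.Dict.mk v).getD "id" 0                   -- v['id']   (Pre_ guarantees the key is present)

def pvRid (r : List (String × List (String × Int))) : Int :=
  pvVid (pvVolOf r)                               -- r['vol']['id']

def pvUpd (r : List (String × List (String × Int))) (v : List (String × Int)) :
    List (String × List (String × Int)) :=
  ((PySem.Dict.mk r).insert "vol" (((PySem.Dict.mk (pvVolOf r)).update v).items)).items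
  -- the appended reservation after r['vol'].update(v)

-- the while-loop of A: i/j advance = dropping the head of the corresponding sorted list
def pvMergeA : List (List (String × List (String × Int))) → List (List (String × Int)) →
    List (List (String × List (String × Int)))
  | [], _ => []
  | _ :: _, [] => []
  | r :: rs, v :: vs =>
    if pvRid r = pvVid v then pvUpd r v :: pvMergeA rs vs
    else if pvRid r < pvVid v then pvMergeA rs (v :: vs)
    else pvMergeA (r :: rs) vs
termination_by rs vs => rs.length + vs.length
decreasing_by all_goals (simp; try omega)

def sort_and_merge (reservations : List (List (String × List (String × Int)))) (vols : List (List (String × Int))) (join_key : String) : List (List (String × List (String × Int))) :=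
  pvMergeA (PySem.List.sorted reservations pvRid) (PySem.List.sorted vols pvVid)

-- ===== PORT B =====
-- queues: vol id -> stack of its vols, pushed in reverse sorted order
-- (for v in reversed(vols): queues.setdefault(v['id'], []).append(v))
def pvQueues (vols : List (List (String × Int))) : PySem.Dict Int (List (List (String × Int))) :=
  vols.reverse.foldl (fun d v => d.modify (pvVid v) [] (· ++ [v])) PySem.Dict.empty

-- the reservation loop of B: q = queues.get(k); if q: v = q.pop(); append; update
def pvLoopB : List (List (String × List (String × Int))) →
    PySem.Dict Int (List (List (String × Int))) → List (List (String × List (String × Int)))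
  | [], _ => []
  | r :: rs, queues =>
    match queues.get? (pvRid r) with
    | none => pvLoopB rs queues
    | some q =>
      match PySem.List.pop? q with                 -- q.pop(); none exactly when q is empty
      | none => pvLoopB rs queues
      | some (v, rest) => pvUpd r v :: pvLoopB rs (queues.insert (pvRid r) rest)

def sort_and_merge_alt (reservations : List (List (String × List (String × Int)))) (vols : List (List (String × Int))) (join_key : String) : List (List (String × List (String × Int))) :=
  pvLoopB (PySem.List.sorted reservations pvRid)
    (pvQueues (PySem.List.sorted vols pvVid))

-- ===== PRECONDITION & SPEC =====
-- Pre_ excludes exactly the inputs on which Python A raises KeyError: a reservation without a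
-- 'vol' key or whose vol dict lacks 'id', or a vol without an 'id' key.
def Pre_sort_and_merge (reservations : List (List (String × List (String × Int)))) (vols : List (List (String × Int))) (join_key : String) : Prop :=
  (∀ r ∈ reservations, ((PySem.Dict.mk r).get? "vol").isSome = true ∧
      ((PySem.Dict.mk (((PySem.Dict.mk r).get? "vol").getD [])).get? "id").isSome = true) ∧
  (∀ v ∈ vols, ((PySem.Dict.mk v).get? "id").isSome = true)
instance (reservations : List (List (String × List (String × Int)))) (vols : List (List (String × Int))) (join_key : String) : Decidable (Pre_sort_and_merge reservations vols join_key) := by unfold Pre_sort_and_merge; infer_instance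

def pvWitness_sort_and_merge : (List (List (String × List (String × Int)))) × (List (List (String × Int))) × String :=
  ([[("vol", [("id", 2)])], [("vol", [("id", 1)])]], [[("id", 1), ("prix", 30)], [("id", 2), ("prix", 40)]], "id")

def Spec_sort_and_merge (reservations : List (List (String × List (String × Int)))) (vols : List (List (String × Int))) (join_key : String) (out : List (List (String × List (String × Int)))) : Prop := out = sort_and_merge_alt reservations vols join_key
instance (reservations : List (List (String × List (String × Int)))) (vols : List (List (String × Int))) (join_key : String) (out : List (List (String × List (String × Int)))) : Decidable (Spec_sort_and_merge reservations vols join_key out) := by unfold Spec_sort_and_merge; infer_instance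

-- ===== CLAIM (what is proved, stated in full; the proofs are below) =====
def Claim_equal_sort_and_merge : Prop := ∀ (reservations : List (List (String × List (String × Int)))) (vols : List (List (String × Int))) (join_key : String), Dom_sort_and_merge reservations vols join_key → Pre_sort_and_merge reservations vols join_key → Spec_sort_and_merge reservations vols join_key (sort_and_merge reservations vols join_key)

-- ===== LEMMAS AND PROOFS =====

-- the index built by B holds, under each id k, exactly the vols of id k in reverse list order
theorem pvQueues_getD (vs : List (List (String × Int))) (k : Int) :
    (pvQueues vs).getD k [] = (vs.filter (fun v => pvVid v == k)).reverse := by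
  have h1 : pvQueues vs
      = (vs.reverse.map (fun v => (pvVid v, v))).foldl
          (fun (d : PySem.Dict Int (List (List (String × Int)))) p =>
            d.modify p.1 [] (fun x => x ++ [p.2])) PySem.Dict.empty := by
    unfold pvQueues
    exact (List.foldl_map (f := fun v => (pvVid v, v))
      (g := fun (d : PySem.Dict Int (List (List (String × Int)))) p =>
        d.modify p.1 [] (fun x => x ++ [p.2])) (l := vs.reverse)
      (init := PySem.Dict.empty)).symm
  rw [h1, PySem.Dict.getD_foldl_modify_append, PySem.Dict.getD_empty,
    List.filter_map, ← List.filter_reverse]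
  simp [Function.comp_def]

-- loop invariant: if the queues hold, for the id of every pending reservation, exactly the
-- not-yet-consumed vols of that id (reversed), B's loop computes A's merge of the sorted lists
theorem pvLoop_eq_merge : ∀ (n : Nat) (rs : List (List (String × List (String × Int))))
    (vs : List (List (String × Int))) (d : PySem.Dict Int (List (List (String × Int)))),
    rs.length + vs.length ≤ n →
    rs.Pairwise (fun a b => pvRid a ≤ pvRid b) →
    vs.Pairwise (fun a b => pvVid a ≤ pvVid b) →
    (∀ r ∈ rs, d.getD (pvRid r) [] = (vs.filter (fun v => pvVid v == pvRid r)).reverse) →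
    pvLoopB rs d = pvMergeA rs vs := by
  intro n
  induction n with
  | zero =>
    intro rs vs d hn _ _ _
    have : rs = [] := by cases rs <;> simp_all
    subst this; simp [pvLoopB, pvMergeA]
  | succ n ih =>
    intro rs vs d hn hrs hvs hinv
    cases rs with
    | nil => simp [pvLoopB, pvMergeA]
    | cons r rs =>
      have hinvr := hinv r (by simp)
      cases vs with
      | nil =>
        have hd : d.getD (pvRid r) [] = [] := by simpa using hinvr
        rw [PySem.Dict.getD_eq_get?_getD] at hd
        have hskip : pvLoopB (r :: rs) d = pvLoopB rs d := by
          cases hq : d.get? (pvRid r) with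
          | none => simp [pvLoopB, hq]
          | some q =>
            rw [hq] at hd
            simp at hd
            simp [pvLoopB, hq, hd, PySem.List.pop?]
        rw [hskip, ih rs [] d (by simp at hn ⊢; omega) (List.Pairwise.sublist (by simp) hrs)
          (by simp) (fun r' hr' => by simpa using hinv r' (by simp [hr']))]
        cases rs <;> simp [pvMergeA]
      | cons v vs =>
        rcases List.pairwise_cons.mp hrs with ⟨hrle, hrs'⟩
        rcases List.pairwise_cons.mp hvs with ⟨hvle, hvs'⟩
        rcases lt_trichotomy (pvRid r) (pvVid v) with hlt | heq | hgt
        · -- reservations[i] id < vols[j] id : A advances i; B finds an empty queue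
          have hfil : ((v :: vs).filter (fun v' => pvVid v' == pvRid r)) = [] := by
            rw [List.filter_eq_nil_iff]
            intro v' hv'
            have : pvVid v ≤ pvVid v' := by
              rcases List.mem_cons.mp hv' with h | h
              · simp [h]
              · exact hvle v' h
            simp; omega
          have hd : d.getD (pvRid r) [] = [] := by rw [hinvr, hfil]; rfl
          rw [PySem.Dict.getD_eq_get?_getD] at hd
          have hskip : pvLoopB (r :: rs) d = pvLoopB rs d := by
            cases hq : d.get? (pvRid r) with
            | none => simp [pvLoopB, hq]
            | some q =>
              rw [hq] at hd
              simp at hd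
              simp [pvLoopB, hq, hd, PySem.List.pop?]
          rw [hskip, ih rs (v :: vs) d (by simp at hn ⊢; omega) hrs' hvs
            (fun r' hr' => hinv r' (by simp [hr']))]
          have : ¬ pvRid r = pvVid v := by omega
          simp [pvMergeA, this, hlt]
        · -- equal ids: A pairs them; B pops the stack for this id
          have hfil : ((v :: vs).filter (fun v' => pvVid v' == pvRid r))
              = v :: vs.filter (fun v' => pvVid v' == pvRid r) := by
            simp [heq]
          have hd : d.getD (pvRid r) []
              = (vs.filter (fun v' => pvVid v' == pvRid r)).reverse ++ [v] := by
            rw [hinvr, hfil]; simp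
          rw [PySem.Dict.getD_eq_get?_getD] at hd
          cases hq : d.get? (pvRid r) with
          | none => rw [hq] at hd; simp at hd
          | some q =>
            rw [hq] at hd
            simp at hd
            subst hd
            have hB : pvLoopB (r :: rs) d
                = pvUpd r v :: pvLoopB rs
                    (d.insert (pvRid r) ((vs.filter (fun v' => pvVid v' == pvRid r)).reverse)) := by
              simp [pvLoopB, hq, PySem.List.pop?_last]
            rw [hB, ih rs vs _ (by simp at hn ⊢; omega) hrs' hvs'
              (fun r' hr' => by
                rw [PySem.Dict.getD_insert]
                by_cases hk : pvRid r' = pvRid r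
                · simp [hk]
                · have : ¬ (pvVid v == pvRid r') = true := by
                    simp [← heq]; exact fun h => hk h.symm
                  rw [if_neg hk, hinv r' (by simp [hr']), List.filter_cons, if_neg this])]
            simp [pvMergeA, heq]
        · -- reservations[i] id > vols[j] id : A advances j; B never touches that vol's queue
          rw [ih (r :: rs) vs d (by simp at hn ⊢; omega) hrs hvs'
            (fun r' hr' => by
              have hge : pvRid r ≤ pvRid r' := by
                rcases List.mem_cons.mp hr' with h | h
                · simp [h]
                · exact hrle r' h
              have : ¬ (pvVid v == pvRid r') = true := by simp; omega
              rw [hinv r' hr', List.filter_cons, if_neg this])]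
          have h1 : ¬ pvRid r = pvVid v := by omega
          have h2 : ¬ pvRid r < pvVid v := by omega
          simp [pvMergeA, h1, h2]

-- ===== VERDICT (by name: the statement is the Claim_ definition above) =====
theorem sort_and_merge_spec : Claim_equal_sort_and_merge := by
  intro reservations vols join_key _ _
  unfold Spec_sort_and_merge sort_and_merge sort_and_merge_alt
  exact (pvLoop_eq_merge
    ((PySem.List.sorted reservations pvRid).length + (PySem.List.sorted vols pvVid).length)
    _ _ _ le_rfl (PySem.List.sorted_pairwise _ _) (PySem.List.sorted_pairwise _ _)
    (fun r _ => pvQueues_getD _ _)).symm
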